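-- pv_equiv track=rewrite | github.com/AlexLimCor/TP-Algo-Guarna-Maquina | dinamica_juego_v2.py | diccionario_jugadores
-- ===== SOURCE A (Python) =====
-- def diccionario_jugadores(lista_jugadores):
--     '''
--     Recibe un lista_jugadores y retorna un diccionario donde se almacena la posicion, la cantidad de aciertos y errores del jugador
--     ejemplo: dicc_participantes = {"nombre":[posicion,ACIERTO,ERRORES]}
--     '''
--     ACIERTO = 0
--     ERRORES = 0
--     posicion = 1
--     dicc_participantes = {}
--     for element in lista_jugadores:
--         if not element in dicc_participantes:
--             dicc_participantes[element] = [posicion,ACIERTO,ERRORES]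
--             posicion +=1
--     return dicc_participantes
-- ===== SOURCE B (Python) =====
-- def diccionario_jugadores(lista_jugadores):
--     '''
--     Recursive decomposition: the first player gets position 1; recurse on the rest of the
--     list with every duplicate of that player filtered out, then shift positions by 1.
--     '''
--     if not lista_jugadores:
--         return {}
--     primero = lista_jugadores[0]
--     resto = diccionario_jugadores([n for n in lista_jugadores[1:] if n != primero])
--     dicc = {primero: [1, 0, 0]}
--     for n, v in resto.items():
--         dicc[n] = [v[0] + 1] + v[1:]
--     return dicc
-- ===== Notes on version B (the rewrite author's own statement) =====
-- stated objective: alternative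
-- what changed: Replaces A's single pass carrying a running position counter and a membership branch by a recursive decomposition: the head player gets position 1, the function recurses on the tail with the head's duplicates filtered out, and all recursive positions are shifted by 1.
import Mathlib
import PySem

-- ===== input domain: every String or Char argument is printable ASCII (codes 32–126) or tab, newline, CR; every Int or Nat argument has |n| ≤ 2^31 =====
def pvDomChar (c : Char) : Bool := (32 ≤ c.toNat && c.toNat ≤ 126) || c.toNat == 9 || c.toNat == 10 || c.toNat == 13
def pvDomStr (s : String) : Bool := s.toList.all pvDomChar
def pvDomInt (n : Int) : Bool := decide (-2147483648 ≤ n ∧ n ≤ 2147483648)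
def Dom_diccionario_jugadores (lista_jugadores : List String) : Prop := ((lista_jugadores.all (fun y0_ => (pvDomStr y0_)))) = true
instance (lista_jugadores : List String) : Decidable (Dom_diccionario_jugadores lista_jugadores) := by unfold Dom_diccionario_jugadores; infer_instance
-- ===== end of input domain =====

-- B replaces A's single counter-carrying loop by a recursion: the head gets position 1,
-- the tail (with the head's duplicates filtered out) is handled recursively and its
-- positions are shifted by 1 — an alternative decomposition, not faster.


-- ===== PORT A =====
-- A's loop: for each element, if not yet a key, insert it with [posicion, 0, 0] and bump posicion.
def diccionario_jugadores (lista_jugadores : List String) : List (String × List Int) :=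
  (lista_jugadores.foldl
    (fun (st : PySem.Dict String (List Int) × Int) element =>
      if ¬ (st.1.contains element = true) then
        (st.1.insert element [st.2, 0, 0], st.2 + 1)
      else st)
    (PySem.Dict.empty, 1)).1.items

-- ===== PORT B =====
-- B: empty list → {}; else head gets [1,0,0], recurse on the tail with the head's
-- duplicates filtered out, shift every recursive position by 1.
-- ('[v[0] + 1] + v[1:]' is the head-cons on the value list; the recursive dict's keys
-- never contain the head, so inserting the head first then the rest is the cons below.)
def diccionario_jugadores_alt : (lista_jugadores : List String) → List (String × List Int)
  | [] => []
  | primero :: resto_lista =>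
    let resto := diccionario_jugadores_alt (resto_lista.filter (fun n => n ≠ primero))
    (primero, [1, 0, 0]) :: resto.map (fun q => (q.1,
      match q.2 with
      | v0 :: vrest => (v0 + 1) :: vrest
      | [] => []))   -- unreachable: every stored value is a 3-list ('v[0]' never raises)
  termination_by l => l.length
  decreasing_by
    simp only [List.length_unattach, List.length_cons]
    exact Nat.lt_succ_of_le (le_trans (List.length_filter_le _ _) (by simp))

-- ===== PRECONDITION & SPEC =====
def Spec_diccionario_jugadores (lista_jugadores : List String) (out : List (String × List Int)) : Prop := out = diccionario_jugadores_alt lista_jugadores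
instance (lista_jugadores : List String) (out : List (String × List Int)) : Decidable (Spec_diccionario_jugadores lista_jugadores out) := by unfold Spec_diccionario_jugadores; infer_instance

-- ===== CLAIM (what is proved, stated in full; the proofs are below) =====
def Claim_equal_diccionario_jugadores : Prop := ∀ (lista_jugadores : List String), Dom_diccionario_jugadores lista_jugadores → Spec_diccionario_jugadores lista_jugadores (diccionario_jugadores lista_jugadores)

-- ===== LEMMAS AND PROOFS =====

-- A dedup fold only ever appends to its accumulator.
theorem pv_foldl_add_prefix {α : Type} [BEq α] (l : List α) (s : List α) :
    ∃ t, List.foldl PySem.Set.add s l = s ++ t := by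
  induction l generalizing s with
  | nil => exact ⟨[], by simp⟩
  | cons x l ih =>
    simp only [List.foldl_cons, PySem.Set.add]
    split
    · exact ih s
    · obtain ⟨t, ht⟩ := ih (s ++ [x])
      exact ⟨x :: t, by simpa using ht⟩

-- Loop invariant: A's dict after the fold is its starting items followed by the
-- enumerated new elements that the dedup fold appends after the seen list s.
theorem pv_loop_eq (l : List String) (d : PySem.Dict String (List Int)) (s : List String)
    (hk : d.keys = s) (hnd : d.keys.Nodup) (p : Int) :
    (l.foldl
      (fun (st : PySem.Dict String (List Int) × Int) element =>
        if ¬ (st.1.contains element = true) then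
          (st.1.insert element [st.2, 0, 0], st.2 + 1)
        else st)
      (d, p)).1.items
    = d.items ++ (PySem.List.enumerate ((List.foldl PySem.Set.add s l).drop s.length) p).map
        (fun q => (q.2, [q.1, 0, 0])) := by
  induction l generalizing d s p with
  | nil => simp
  | cons x l ih =>
    have hc : d.contains x = true ↔ x ∈ s := by
      rw [PySem.Dict.contains_iff_mem_keys, hk]
    by_cases hx : x ∈ s
    · have hcx : d.contains x = true := hc.mpr hx
      have hadd : PySem.Set.add s x = s := by
        simp [PySem.Set.add, PySem.Set.contains, hx]
      rw [List.foldl_cons, List.foldl_cons, if_neg (by simp [hcx]), hadd]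
      exact ih d s hk hnd p
    · have hcx : d.contains x = false := by
        cases h : d.contains x
        · rfl
        · exact absurd (hc.mp h) hx
      have hadd : PySem.Set.add s x = s ++ [x] := by
        simp [PySem.Set.add, PySem.Set.contains, hx]
      have hk' : (d.insert x [p, 0, 0]).keys = s ++ [x] :=
        (PySem.Dict.keys_insert_of_not_contains d _ hcx).trans (by rw [hk])
      have hnd' : (d.insert x [p, 0, 0]).keys.Nodup :=
        PySem.Dict.nodup_keys_insert d x _ hnd
      have hitems : (d.insert x [p, 0, 0]).items = d.items ++ [(x, [p, 0, 0])] :=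
        PySem.Dict.items_insert_of_not_contains d _ hcx
      obtain ⟨t, ht⟩ := pv_foldl_add_prefix l (s ++ [x])
      have h1 : ((s ++ [x]) ++ t).drop s.length = x :: t := by
        rw [List.append_assoc, List.drop_left]; rfl
      have h2 : ((s ++ [x]) ++ t).drop (s ++ [x]).length = t := by
        simp
      rw [List.foldl_cons, List.foldl_cons, if_pos (by simp [hcx]), hadd, ht, h1,
        PySem.List.enumerate_cons]
      have hih := ih (d.insert x [p, 0, 0]) (s ++ [x]) hk' hnd' (p + 1)
      rw [ht, h2, hitems] at hih
      exact hih.trans (by simp)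

-- With x already seen, later occurrences of x contribute nothing to the dedup fold.
theorem pv_foldl_add_filter (l : List String) (s : List String) (x : String) (hx : x ∈ s) :
    List.foldl PySem.Set.add s l = List.foldl PySem.Set.add s (l.filter (fun n => n ≠ x)) := by
  induction l generalizing s with
  | nil => rfl
  | cons y l ih =>
    by_cases hyx : y = x
    · subst hyx
      have : PySem.Set.add s y = s := by
        simp [PySem.Set.add, PySem.Set.contains, hx]
      simp [this, ih s hx]
    · simp only [List.filter_cons, List.foldl_cons]
      rw [if_pos (by simp [hyx])]
      simp only [List.foldl_cons]
      have hx' : x ∈ PySem.Set.add s y := by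
        simp only [PySem.Set.add]
        split
        · exact hx
        · exact List.mem_append_left _ hx
      exact ih (PySem.Set.add s y) hx'

-- A seed element absent from the input stays in front of the dedup fold.
theorem pv_foldl_add_cons (l : List String) (s : List String) (x : String) (hx : x ∉ l) :
    List.foldl PySem.Set.add (x :: s) l = x :: List.foldl PySem.Set.add s l := by
  induction l generalizing s with
  | nil => rfl
  | cons y l ih =>
    have hyx : y ≠ x := fun h => hx (h ▸ List.mem_cons_self)
    have hmem : PySem.Set.contains (x :: s) y = PySem.Set.contains s y := by
      simp [PySem.Set.contains, hyx]
    have hadd : PySem.Set.add (x :: s) y = x :: PySem.Set.add s y := by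
      rw [PySem.Set.add, PySem.Set.add, hmem]
      split <;> simp
    simp only [List.foldl_cons, hadd]
    exact ih _ (fun h => hx (List.mem_cons_of_mem _ h))

-- dedup (x :: t) = x :: dedup (t with x filtered out).
theorem pv_dedup_cons (x : String) (t : List String) :
    PySem.Set.ofList (x :: t) = x :: PySem.Set.ofList (t.filter (fun n => n ≠ x)) := by
  have h0 : PySem.Set.ofList (x :: t) = List.foldl PySem.Set.add [x] t := by
    simp [PySem.Set.ofList_eq_foldl, PySem.Set.add, PySem.Set.contains]
  rw [h0, pv_foldl_add_filter t [x] x (List.mem_singleton.mpr rfl),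
    pv_foldl_add_cons _ [] x (by simp), PySem.Set.ofList_eq_foldl]

-- Shifting enumerate's start by one = adding one to every index.
theorem pv_enumerate_shift {α : Type} (l : List α) (s : Int) :
    PySem.List.enumerate l (s + 1) = (PySem.List.enumerate l s).map (fun p => (p.1 + 1, p.2)) := by
  induction l generalizing s with
  | nil => rfl
  | cons y l ih =>
    rw [PySem.List.enumerate_cons, PySem.List.enumerate_cons, List.map_cons, ih (s + 1)]

-- B equals the enumerate-over-dedup closed form.
theorem pv_alt_eq (l : List String) :
    diccionario_jugadores_alt l
      = (PySem.List.enumerate (PySem.Set.ofList l) 1).map (fun q => (q.2, [q.1, 0, 0])) := by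
  induction hn : l.length using Nat.strong_induction_on generalizing l with
  | _ n ih =>
    cases l with
    | nil => rw [diccionario_jugadores_alt]; rfl
    | cons x t =>
      have hlt : (t.filter (fun n => n ≠ x)).length < n := by
        subst hn
        exact Nat.lt_succ_of_le (List.length_filter_le _ _)
      have hrec := ih _ hlt (t.filter (fun n => n ≠ x)) rfl
      rw [diccionario_jugadores_alt, hrec, pv_dedup_cons, PySem.List.enumerate_cons,
        List.map_cons, pv_enumerate_shift, List.map_map, List.map_map]
      rfl

-- ===== VERDICT (by name: the statement is the Claim_ definition above) =====
theorem diccionario_jugadores_spec : Claim_equal_diccionario_jugadores := by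
  intro l _
  show _ = _
  unfold diccionario_jugadores
  rw [pv_loop_eq l PySem.Dict.empty [] (by simp) (by simp) 1, pv_alt_eq]
  simp [PySem.Dict.empty, PySem.Set.ofList_eq_foldl]
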